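-- pv_equiv track=rewrite | github.com/akashsara/debiasing-language-models | src/data.py | add_sentinel_tokens
-- ===== SOURCE A (Python) =====
-- from typing import Dict, Tuple, List, Sequence
--
-- def add_sentinel_tokens(
--         sequence: List[str], mask_indices: List[int]
-- ) -> Tuple[Sequence[str], Sequence[str]]:
--     """
--     Apply sentinel masking
--     Ref: https://arxiv.org/pdf/1910.10683.pdf (Figure 2)
--     Note: This can probably be improved.
--     """
--     masked_input, masked_target = [], []
--     input_sentinels = -1
--     target_sentinels = -1
--     previous_masked_input = False
--     previous_masked_target = False
--     for i, word in enumerate(sequence):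
--         if i in mask_indices:
--             previous_masked_target = False
--             if not previous_masked_input:
--                 input_sentinels += 1
--                 masked_input.append(f"<extra_id_{input_sentinels}>")
--             masked_target.append(word)
--             previous_masked_input = True
--         else:
--             previous_masked_input = False
--             if not previous_masked_target:
--                 target_sentinels += 1
--                 masked_target.append(f"<extra_id_{target_sentinels}>")
--             masked_input.append(word)
--             previous_masked_target = True
--     return masked_input, masked_target
-- ===== SOURCE B (Python) =====
-- from itertools import groupby
--
--
-- def add_sentinel_tokens(sequence, mask_indices):
--     """Sentinel masking via one grouped pass over consecutive masked/unmasked runs."""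
--     mask_set = set(mask_indices)
--     masked_input, masked_target = [], []
--     input_count = 0
--     target_count = 0
--     for is_masked, group in groupby(
--         enumerate(sequence), key=lambda iw: iw[0] in mask_set
--     ):
--         words = [w for _, w in group]
--         if is_masked:
--             masked_input.append(f"<extra_id_{input_count}>")
--             masked_target.extend(words)
--             input_count += 1
--         else:
--             masked_target.append(f"<extra_id_{target_count}>")
--             masked_input.extend(words)
--             target_count += 1
--     return masked_input, masked_target
-- ===== Notes on version B (the rewrite author's own statement) =====
-- stated objective: faster
-- what changed: Replaces the per-element previous-flag state machine, whose `i in mask_indices` list scan runs once per word, by a mask set built once plus an itertools.groupby walk over consecutive masked/unmasked runs, emitting one sentinel per run.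
import Mathlib
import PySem

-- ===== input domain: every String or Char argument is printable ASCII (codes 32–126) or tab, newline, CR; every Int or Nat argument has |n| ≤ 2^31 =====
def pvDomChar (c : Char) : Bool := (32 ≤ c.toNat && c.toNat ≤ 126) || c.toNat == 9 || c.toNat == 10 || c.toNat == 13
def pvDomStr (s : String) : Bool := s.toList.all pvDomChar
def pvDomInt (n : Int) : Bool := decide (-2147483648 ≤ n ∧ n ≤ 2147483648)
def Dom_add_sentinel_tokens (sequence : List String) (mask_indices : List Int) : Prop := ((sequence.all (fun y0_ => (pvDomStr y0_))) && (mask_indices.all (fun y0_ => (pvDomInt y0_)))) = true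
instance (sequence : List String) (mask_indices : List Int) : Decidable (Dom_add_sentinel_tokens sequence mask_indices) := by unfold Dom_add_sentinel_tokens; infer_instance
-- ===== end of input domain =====

-- B replaces A's per-element previous-flag state machine (with a per-word linear scan of
-- mask_indices) by a mask set built once plus a groupby walk over consecutive masked/unmasked runs.


-- ===== PORT A =====
-- f"<extra_id_{n}>"
def pvSentinel (n : Int) : String := "<extra_id_" ++ PySem.Int.toStr n ++ ">"

-- A's loop: state (index i, masked_input, masked_target, input_sentinels, target_sentinels,
-- previous_masked_input, previous_masked_target), branches in A's order.
def pvLoopA (maskIndices : List Int) :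
    List String → Int → List String → List String → Int → Int → Bool → Bool →
    List String × List String
  | [], _, mi, mt, _, _, _, _ => (mi, mt)
  | w :: ws, i, mi, mt, isent, tsent, pin, ptgt =>
    if maskIndices.contains i then
      let isent' := if !pin then isent + 1 else isent
      let mi' := if !pin then mi ++ [pvSentinel isent'] else mi
      pvLoopA maskIndices ws (i + 1) mi' (mt ++ [w]) isent' tsent true false
    else
      let tsent' := if !ptgt then tsent + 1 else tsent
      let mt' := if !ptgt then mt ++ [pvSentinel tsent'] else mt
      pvLoopA maskIndices ws (i + 1) (mi ++ [w]) mt' isent tsent' false true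

def add_sentinel_tokens (sequence : List String) (mask_indices : List Int) : List String × List String :=
  pvLoopA mask_indices sequence 0 [] [] (-1) (-1) false false

-- ===== PORT B =====
-- itertools.groupby over (word, is_masked) flags: consecutive runs with equal flag.
def pvGroupRuns : List (String × Bool) → List (Bool × List String)
  | [] => []
  | (w, b) :: rest =>
    (b, w :: (rest.takeWhile (fun x => x.2 == b)).map Prod.fst) ::
      pvGroupRuns (rest.dropWhile (fun x => x.2 == b))
termination_by xs => xs.length
decreasing_by
  simpa using Nat.lt_succ_of_le (List.length_dropWhile_le _ _)

-- B's loop body over the runs, with the two counters.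
def pvRunsFold : List (Bool × List String) → List String → List String → Int → Int →
    List String × List String
  | [], mi, mt, _, _ => (mi, mt)
  | (true, ws) :: rs, mi, mt, ci, ct =>
      pvRunsFold rs (mi ++ [pvSentinel ci]) (mt ++ ws) (ci + 1) ct
  | (false, ws) :: rs, mi, mt, ci, ct =>
      pvRunsFold rs (mi ++ ws) (mt ++ [pvSentinel ct]) ci (ct + 1)

def add_sentinel_tokens_alt (sequence : List String) (mask_indices : List Int) : List String × List String :=
  let maskSet := PySem.Set.ofList mask_indices
  let flags := (PySem.List.enumerate sequence).map (fun p => (p.2, PySem.Set.contains maskSet p.1))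
  pvRunsFold (pvGroupRuns flags) [] [] 0 0

-- ===== PRECONDITION & SPEC =====
def Spec_add_sentinel_tokens (sequence : List String) (mask_indices : List Int) (out : List String × List String) : Prop := out = add_sentinel_tokens_alt sequence mask_indices
instance (sequence : List String) (mask_indices : List Int) (out : List String × List String) : Decidable (Spec_add_sentinel_tokens sequence mask_indices out) := by unfold Spec_add_sentinel_tokens; infer_instance

-- ===== CLAIM (what is proved, stated in full; the proofs are below) =====
def Claim_equal_add_sentinel_tokens : Prop := ∀ (sequence : List String) (mask_indices : List Int), Dom_add_sentinel_tokens sequence mask_indices → Spec_add_sentinel_tokens sequence mask_indices (add_sentinel_tokens sequence mask_indices)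

-- ===== LEMMAS AND PROOFS =====

-- the (word, is-masked) flag list both algorithms are driven by
def pvFlags (maskIndices : List Int) (i : Int) : List String → List (String × Bool)
  | [] => []
  | w :: ws => (w, maskIndices.contains i) :: pvFlags maskIndices (i + 1) ws

-- A's loop on flags only, without accumulators
def pvStep : List (String × Bool) → Bool → Bool → Int → Int → List String × List String
  | [], _, _, _, _ => ([], [])
  | (w, b) :: rest, pin, ptgt, isent, tsent =>
    if b then
      let isent' := if !pin then isent + 1 else isent
      let r := pvStep rest true false isent' tsent
      ((if !pin then [pvSentinel isent'] else []) ++ r.1, w :: r.2)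
    else
      let tsent' := if !ptgt then tsent + 1 else tsent
      let r := pvStep rest false true isent tsent'
      (w :: r.1, (if !ptgt then [pvSentinel tsent'] else []) ++ r.2)

-- B's fold on runs, without accumulators
def pvRuns : List (Bool × List String) → Int → Int → List String × List String
  | [], _, _ => ([], [])
  | (true, ws) :: rs, ci, ct =>
      let r := pvRuns rs (ci + 1) ct
      (pvSentinel ci :: r.1, ws ++ r.2)
  | (false, ws) :: rs, ci, ct =>
      let r := pvRuns rs ci (ct + 1)
      (ws ++ r.1, pvSentinel ct :: r.2)

theorem pvLoopA_eq_step (maskIndices : List Int) :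
    ∀ (ws : List String) (i : Int) (mi mt : List String) (isent tsent : Int) (pin ptgt : Bool),
      pvLoopA maskIndices ws i mi mt isent tsent pin ptgt =
        (mi ++ (pvStep (pvFlags maskIndices i ws) pin ptgt isent tsent).1,
         mt ++ (pvStep (pvFlags maskIndices i ws) pin ptgt isent tsent).2) := by
  intro ws
  induction ws with
  | nil => intro i mi mt isent tsent pin ptgt; simp [pvLoopA, pvFlags, pvStep]
  | cons w ws ih =>
    intro i mi mt isent tsent pin ptgt
    simp only [pvLoopA, pvFlags, pvStep]
    by_cases h : maskIndices.contains i
    · simp only [h, if_true, ih]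
      cases pin <;> simp
    · simp only [h, ih]
      cases ptgt <;> simp

theorem pvRunsFold_eq_runs :
    ∀ (rs : List (Bool × List String)) (mi mt : List String) (ci ct : Int),
      pvRunsFold rs mi mt ci ct =
        (mi ++ (pvRuns rs ci ct).1, mt ++ (pvRuns rs ci ct).2) := by
  intro rs
  induction rs with
  | nil => intro mi mt ci ct; simp [pvRunsFold, pvRuns]
  | cons r rs ih =>
    intro mi mt ci ct
    obtain ⟨b, ws⟩ := r
    cases b <;> simp [pvRunsFold, pvRuns, ih]

theorem pvFlags_eq_enumerate (maskIndices : List Int) :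
    ∀ (ws : List String) (i : Int),
      (PySem.List.enumerate ws i).map
          (fun p => (p.2, PySem.Set.contains (PySem.Set.ofList maskIndices) p.1)) =
        pvFlags maskIndices i ws := by
  intro ws
  induction ws with
  | nil => intro i; simp [PySem.List.enumerate_nil, pvFlags]
  | cons w ws ih =>
    intro i
    rw [PySem.List.enumerate_cons]
    simp only [List.map_cons, ih, pvFlags]
    congr 1
    simp only [Prod.mk.injEq, true_and]
    rw [Bool.eq_iff_iff, PySem.Set.contains_iff, PySem.Set.mem_ofList, List.contains_iff_mem]

-- head-step reductions of pvStep in the fresh (false, false) state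
theorem pvStep_cons_true0 (w : String) (rest : List (String × Bool)) (isent tsent : Int) :
    pvStep ((w, true) :: rest) false false isent tsent =
      (pvSentinel (isent + 1) :: (pvStep rest true false (isent + 1) tsent).1,
       w :: (pvStep rest true false (isent + 1) tsent).2) := by
  simp [pvStep]

theorem pvStep_cons_false0 (w : String) (rest : List (String × Bool)) (isent tsent : Int) :
    pvStep ((w, false) :: rest) false false isent tsent =
      (w :: (pvStep rest false true isent (tsent + 1)).1,
       pvSentinel (tsent + 1) :: (pvStep rest false true isent (tsent + 1)).2) := by
  simp [pvStep]

-- pvStep in state (true, false) swallows the leading masked run into the target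
theorem pvStep_true_run :
    ∀ (rest : List (String × Bool)) (isent tsent : Int),
      pvStep rest true false isent tsent =
        ((pvStep (rest.dropWhile (fun x => x.2 == true)) true false isent tsent).1,
         (rest.takeWhile (fun x => x.2 == true)).map Prod.fst ++
           (pvStep (rest.dropWhile (fun x => x.2 == true)) true false isent tsent).2) := by
  intro rest
  induction rest with
  | nil => intro isent tsent; simp
  | cons x rest ih =>
    intro isent tsent
    obtain ⟨w, c⟩ := x
    cases c
    · simp
    · simp [pvStep, ih]

-- pvStep in state (false, true) swallows the leading unmasked run into the input
theorem pvStep_false_run :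
    ∀ (rest : List (String × Bool)) (isent tsent : Int),
      pvStep rest false true isent tsent =
        ((rest.takeWhile (fun x => x.2 == false)).map Prod.fst ++
           (pvStep (rest.dropWhile (fun x => x.2 == false)) false true isent tsent).1,
         (pvStep (rest.dropWhile (fun x => x.2 == false)) false true isent tsent).2) := by
  intro rest
  induction rest with
  | nil => intro isent tsent; simp
  | cons x rest ih =>
    intro isent tsent
    obtain ⟨w, c⟩ := x
    cases c
    · simp [pvStep, ih]
    · simp

theorem pvDrop_head_flag (b : Bool) :
    ∀ (l : List (String × Bool)) (y : String × Bool) (t : List (String × Bool)),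
      l.dropWhile (fun x => x.2 == b) = y :: t → y.2 = !b := by
  intro l
  induction l with
  | nil => intro y t h; simp at h
  | cons x l ih =>
    intro y t h
    simp only [List.dropWhile_cons] at h
    by_cases hx : (x.2 == b) = true
    · rw [if_pos hx] at h
      exact ih _ _ h
    · rw [if_neg hx] at h
      obtain ⟨h1, _⟩ := List.cons_eq_cons.mp h
      subst h1
      cases b <;> simp_all

-- after a masked run, the stale previous_masked_input flag is never read
theorem pvStep_after_true_run (rest : List (String × Bool)) (isent tsent : Int) :
    pvStep (rest.dropWhile (fun x => x.2 == true)) true false isent tsent =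
      pvStep (rest.dropWhile (fun x => x.2 == true)) false false isent tsent := by
  cases hdw : rest.dropWhile (fun x => x.2 == true) with
  | nil => rfl
  | cons y t =>
    obtain ⟨wy, cy⟩ := y
    have hy : cy = !true := pvDrop_head_flag true rest (wy, cy) t hdw
    simp_all [pvStep]

-- after an unmasked run, the stale previous_masked_target flag is never read
theorem pvStep_after_false_run (rest : List (String × Bool)) (isent tsent : Int) :
    pvStep (rest.dropWhile (fun x => x.2 == false)) false true isent tsent =
      pvStep (rest.dropWhile (fun x => x.2 == false)) false false isent tsent := by
  cases hdw : rest.dropWhile (fun x => x.2 == false) with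
  | nil => rfl
  | cons y t =>
    obtain ⟨wy, cy⟩ := y
    have hy : cy = !false := pvDrop_head_flag false rest (wy, cy) t hdw
    simp_all [pvStep]

-- the main correspondence: A's flag loop from a fresh state = B's run fold
theorem pvStep_eq_runs :
    ∀ (n : Nat) (fs : List (String × Bool)), fs.length ≤ n → ∀ (ci ct : Int),
      pvStep fs false false (ci - 1) (ct - 1) = pvRuns (pvGroupRuns fs) ci ct := by
  intro n
  induction n with
  | zero =>
    intro fs h ci ct
    have : fs = [] := List.eq_nil_of_length_eq_zero (Nat.le_zero.mp h)
    subst this; simp [pvStep, pvGroupRuns, pvRuns]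
  | succ n ih =>
    intro fs h ci ct
    match fs with
    | [] => simp [pvStep, pvGroupRuns, pvRuns]
    | (w, b) :: rest =>
      have hlen : rest.length ≤ n := by
        simpa using Nat.lt_succ_iff.mp (Nat.lt_of_lt_of_le (by simp) h)
      have hdk : (rest.dropWhile (fun x => x.2 == b)).length ≤ n :=
        le_trans (List.length_dropWhile_le _ _) hlen
      cases b
      · -- unmasked run
        rw [pvStep_cons_false0, pvStep_false_run, pvStep_after_false_run]
        have hih := ih _ hdk ci (ct + 1)
        rw [show (ct + 1 : Int) - 1 = ct by ring] at hih
        rw [show (ct - 1 : Int) + 1 = ct by ring, hih]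
        simp [pvGroupRuns, pvRuns]
      · -- masked run
        rw [pvStep_cons_true0, pvStep_true_run, pvStep_after_true_run]
        have hih := ih _ hdk (ci + 1) ct
        rw [show (ci + 1 : Int) - 1 = ci by ring] at hih
        rw [show (ci - 1 : Int) + 1 = ci by ring, hih]
        simp [pvGroupRuns, pvRuns]

-- ===== VERDICT (by name: the statement is the Claim_ definition above) =====
theorem add_sentinel_tokens_spec : Claim_equal_add_sentinel_tokens := by
  intro sequence mask_indices _hdom
  unfold Spec_add_sentinel_tokens add_sentinel_tokens add_sentinel_tokens_alt
  rw [pvLoopA_eq_step, pvRunsFold_eq_runs, pvFlags_eq_enumerate]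
  rw [show (-1 : Int) = 0 - 1 by ring]
  rw [pvStep_eq_runs (pvFlags mask_indices 0 sequence).length _ le_rfl 0 0]
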